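-- pv_equiv track=rewrite | github.com/sibyllinesoft/clean | src/sibylline_clean/content/extractors.py | _iter_cells
-- ===== SOURCE A (Python) =====
-- def _iter_cells(text: str) -> list[tuple[int, int, str, int, int]]:
--     """Parse CSV text and yield (row, col, value, content_start, content_end).
--
--     ``content_start``/``content_end`` point to the cell's raw in-file content,
--     excluding surrounding quotes for quoted cells.
--     """
--     cells: list[tuple[int, int, str, int, int]] = []
--     n = len(text)
--     i = 0
--     row_idx = 0
--     col_idx = 0
--
--     while i < n:
--         if text[i] == '"':
--             # Quoted field: unescape doubled quotes while tracking raw bounds.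
--             i += 1
--             content_start = i
--             chars: list[str] = []
--
--             while i < n:
--                 ch = text[i]
--                 if ch == '"':
--                     if i + 1 < n and text[i + 1] == '"':
--                         chars.append('"')
--                         i += 2
--                         continue
--                     content_end = i
--                     i += 1  # consume closing quote
--                     break
--
--                 chars.append(ch)
--                 i += 1
--             else:
--                 # Unterminated quote: treat remaining text as content.
--                 content_end = n
--
--             cell = "".join(chars)
--
--             # Consume any trailing whitespace before delimiter/newline.
--             while i < n and text[i] not in ",\r\n":
--                 i += 1
--         else:
--             # Unquoted field.
--             content_start = i
--             while i < n and text[i] not in ",\r\n":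
--                 i += 1
--             content_end = i
--             cell = text[content_start:content_end]
--
--         cells.append((row_idx, col_idx, cell, content_start, content_end))
--
--         if i >= n:
--             break
--
--         if text[i] == ",":
--             i += 1
--             col_idx += 1
--             continue
--
--         if text[i] == "\r":
--             i += 2 if i + 1 < n and text[i + 1] == "\n" else 1
--             row_idx += 1
--             col_idx = 0
--             continue
--
--         if text[i] == "\n":
--             i += 1
--             row_idx += 1
--             col_idx = 0
--             continue
--
--         # Defensive recovery for unexpected delimiter characters.
--         i += 1
--
--     return cells
-- ===== SOURCE B (Python) =====
-- def _iter_cells(text: str) -> list[tuple[int, int, str, int, int]]: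
--     """Single flat scan with an explicit parser state machine.
--
--     States: 0 = at start of a field, 1 = inside an unquoted field,
--     2 = inside a quoted field, 3 = after the closing quote.
--     """
--     cells: list[tuple[int, int, str, int, int]] = []
--     n = len(text)
--     row = col = 0
--     mode = 0
--     buf: list[str] = []
--     start = 0
--     end = 0
--     i = 0
--     while i < n:
--         ch = text[i]
--         if mode == 2:
--             if ch == '"':
--                 if i + 1 < n and text[i + 1] == '"':
--                     buf.append('"')
--                     i += 2
--                 else:
--                     end = i
--                     mode = 3
--                     i += 1
--             else:
--                 buf.append(ch)
--                 i += 1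
--             continue
--         if mode == 0:
--             if ch == '"':
--                 mode = 2
--                 i += 1
--                 start = i
--                 buf = []
--                 continue
--             mode = 1
--             start = i
--             buf = []
--         if ch == ',':
--             cells.append((row, col, "".join(buf), start, i if mode == 1 else end))
--             col += 1
--             mode = 0
--             i += 1
--         elif ch == '\r' or ch == '\n':
--             cells.append((row, col, "".join(buf), start, i if mode == 1 else end))
--             row += 1
--             col = 0
--             mode = 0
--             i += 2 if ch == '\r' and i + 1 < n and text[i + 1] == '\n' else 1
--         elif mode == 1:
--             buf.append(ch)
--             i += 1
--         else:  # mode == 3: skip stray characters after the closing quote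
--             i += 1
--     if mode == 1 or mode == 2:
--         cells.append((row, col, "".join(buf), start, n))
--     elif mode == 3:
--         cells.append((row, col, "".join(buf), start, end))
--     return cells
-- ===== Notes on version B (the rewrite author's own statement) =====
-- stated objective: alternative
-- what changed: Replaced A's nested while-loops (an outer cell loop containing separate inner quote/scan/skip loops) by a single flat character loop driven by an explicit 4-state parser state machine (field-start / unquoted / in-quote / after-quote) with a char buffer and pending-cell emission at delimiters and EOF.
import Mathlib
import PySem

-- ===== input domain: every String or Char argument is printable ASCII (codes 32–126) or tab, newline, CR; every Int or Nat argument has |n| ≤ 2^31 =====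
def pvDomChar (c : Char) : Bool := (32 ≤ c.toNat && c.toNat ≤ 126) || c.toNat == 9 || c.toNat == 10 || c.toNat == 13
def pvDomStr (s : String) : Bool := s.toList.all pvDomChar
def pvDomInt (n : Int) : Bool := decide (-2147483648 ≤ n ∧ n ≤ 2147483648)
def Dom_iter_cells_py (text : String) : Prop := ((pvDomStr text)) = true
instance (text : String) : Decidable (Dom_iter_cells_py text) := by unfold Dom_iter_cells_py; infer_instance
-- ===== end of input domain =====

-- B replaces A's nested while-loops by one flat per-character loop with an explicit
-- 4-state parser state machine; same cost, different decomposition (objective: alternative).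

-- ===== PORT A =====
-- A's two identical inner scans `while i < n and text[i] not in ",\r\n": i += 1`
def scanA (cs : List Char) (i : Nat) : Nat :=
  if h : i < cs.length then
    if cs[i] = ',' ∨ cs[i] = '\r' ∨ cs[i] = '\n' then i
    else scanA cs (i + 1)
  else i
termination_by cs.length - i
decreasing_by exact Nat.sub_succ_lt_self _ _ h

theorem scanA_ge (cs : List Char) (i : Nat) : i ≤ scanA cs i := by
  unfold scanA
  split
  · split
    · exact le_refl _
    · exact le_trans (Nat.le_succ i) (scanA_ge cs (i + 1))
  · exact le_refl _
termination_by cs.length - i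

-- A's inner quoted-field loop; returns (chars, content_end?, i); `none` = unterminated (for/else)
def quoteA (cs : List Char) (i : Nat) (chars : List Char) : List Char × Option Nat × Nat :=
  if h : i < cs.length then
    if cs[i] = '"' then
      if i + 1 < cs.length ∧ cs[i + 1]? = some '"' then
        quoteA cs (i + 2) (chars ++ ['"'])
      else (chars, some i, i + 1)
    else quoteA cs (i + 1) (chars ++ [cs[i]])
  else (chars, none, i)
termination_by cs.length - i
decreasing_by
  · exact Nat.lt_of_le_of_lt (Nat.sub_le_sub_left (Nat.le_succ (i + 1)) _)
      (Nat.sub_succ_lt_self _ _ h)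
  · exact Nat.sub_succ_lt_self _ _ h

theorem quoteA_ge (cs : List Char) (i : Nat) (chars : List Char) :
    i ≤ (quoteA cs i chars).2.2 := by
  unfold quoteA
  split
  · split
    · split
      · exact le_trans (Nat.le_add_right i 2) (quoteA_ge cs (i + 2) (chars ++ ['"']))
      · exact Nat.le_succ i
    · exact le_trans (Nat.le_succ i) (quoteA_ge cs (i + 1) _)
  · exact le_refl _
termination_by cs.length - i

def loopA (cs : List Char) (i row col : Nat)
    (cells : List (Int × Int × String × Int × Int)) : List (Int × Int × String × Int × Int) :=
  if hi : i < cs.length then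
    if cs[i] = '"' then
      -- quoted field
      let q := quoteA cs (i + 1) []
      let i2 := scanA cs q.2.2
      let cells := cells ++ [((row : Int), (col : Int), String.ofList q.1,
        ((i + 1 : Nat) : Int), ((q.2.1.getD cs.length : Nat) : Int))]
      if h2 : i2 < cs.length then
        if cs[i2] = ',' then loopA cs (i2 + 1) row (col + 1) cells
        else if cs[i2] = '\r' then
          loopA cs (if i2 + 1 < cs.length ∧ cs[i2 + 1]? = some '\n' then i2 + 2 else i2 + 1)
            (row + 1) 0 cells
        else if cs[i2] = '\n' then loopA cs (i2 + 1) (row + 1) 0 cells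
        else loopA cs (i2 + 1) row col cells
      else cells
    else
      -- unquoted field
      let i2 := scanA cs i
      let cells := cells ++ [((row : Int), (col : Int), String.ofList ((cs.take i2).drop i),
        (i : Int), ((i2 : Nat) : Int))]
      if h2 : i2 < cs.length then
        if cs[i2] = ',' then loopA cs (i2 + 1) row (col + 1) cells
        else if cs[i2] = '\r' then
          loopA cs (if i2 + 1 < cs.length ∧ cs[i2 + 1]? = some '\n' then i2 + 2 else i2 + 1)
            (row + 1) 0 cells
        else if cs[i2] = '\n' then loopA cs (i2 + 1) (row + 1) 0 cells
        else loopA cs (i2 + 1) row col cells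
      else cells
  else cells
termination_by cs.length - i
decreasing_by
  all_goals
    try split
  all_goals
    first
      | (have h1 : i < (quoteA cs (i + 1) ([] : List Char)).2.2 :=
           quoteA_ge cs (i + 1) ([] : List Char)
         have h2 := scanA_ge cs (quoteA cs (i + 1) ([] : List Char)).2.2
         exact Nat.sub_lt_sub_left hi
           (Nat.lt_succ_of_lt (Nat.lt_succ_of_lt (Nat.lt_of_lt_of_le h1 h2))))
      | (exact Nat.sub_lt_sub_left hi
           (Nat.lt_succ_of_lt (Nat.lt_succ_of_lt (Nat.lt_of_lt_of_le
             (quoteA_ge cs (i + 1) ([] : List Char))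
             (scanA_ge cs (quoteA cs (i + 1) ([] : List Char)).2.2)))))
      | (exact Nat.sub_lt_sub_left hi
           (Nat.lt_succ_of_lt (Nat.lt_of_lt_of_le
             (quoteA_ge cs (i + 1) ([] : List Char))
             (scanA_ge cs (quoteA cs (i + 1) ([] : List Char)).2.2))))
      | (exact Nat.sub_lt_sub_left hi (Nat.lt_succ_of_lt (Nat.lt_succ_of_le (scanA_ge cs i))))
      | (exact Nat.sub_lt_sub_left hi (Nat.lt_succ_of_le (scanA_ge cs i)))

def iter_cells_py (text : String) : List (Int × Int × String × Int × Int) :=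
  loopA text.toList 0 0 0 []

-- ===== PORT B =====
inductive BMode | start | unq | inq | afterq
deriving DecidableEq, Repr

def loopB (cs : List Char) (i row col : Nat) (mode : BMode) (cstart cend : Nat)
    (buf : List Char) (cells : List (Int × Int × String × Int × Int)) :
    List (Int × Int × String × Int × Int) :=
  if h : i < cs.length then
    let ch := cs[i]
    if mode = .inq then
      if ch = '"' then
        if i + 1 < cs.length ∧ cs[i + 1]? = some '"' then
          loopB cs (i + 2) row col .inq cstart cend (buf ++ ['"']) cells
        else loopB cs (i + 1) row col .afterq cstart i buf cells
      else loopB cs (i + 1) row col .inq cstart cend (buf ++ [ch]) cells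
    else
      if mode = .start ∧ ch = '"' then
        loopB cs (i + 1) row col .inq (i + 1) cend [] cells
      else
        let s := if mode = .start then (BMode.unq, i, ([] : List Char)) else (mode, cstart, buf)
        if ch = ',' then
          loopB cs (i + 1) row (col + 1) .start s.2.1 cend s.2.2
            (cells ++ [((row : Int), (col : Int), String.ofList s.2.2, (s.2.1 : Int),
              ((if s.1 = .unq then i else cend : Nat) : Int))])
        else if ch = '\r' ∨ ch = '\n' then
          loopB cs (if ch = '\r' ∧ i + 1 < cs.length ∧ cs[i + 1]? = some '\n' then i + 2 else i + 1)
            (row + 1) 0 .start s.2.1 cend s.2.2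
            (cells ++ [((row : Int), (col : Int), String.ofList s.2.2, (s.2.1 : Int),
              ((if s.1 = .unq then i else cend : Nat) : Int))])
        else if s.1 = .unq then
          loopB cs (i + 1) row col .unq s.2.1 cend (s.2.2 ++ [ch]) cells
        else
          loopB cs (i + 1) row col .afterq s.2.1 cend s.2.2 cells
  else
    match mode with
    | .start => cells
    | .unq => cells ++ [((row : Int), (col : Int), String.ofList buf, (cstart : Int), (cs.length : Int))]
    | .inq => cells ++ [((row : Int), (col : Int), String.ofList buf, (cstart : Int), (cs.length : Int))]
    | .afterq => cells ++ [((row : Int), (col : Int), String.ofList buf, (cstart : Int), (cend : Int))]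
termination_by cs.length - i
decreasing_by
  all_goals try split
  all_goals
    first
      | exact Nat.sub_lt_sub_left h (Nat.lt_succ_of_lt (Nat.lt_succ_self i))
      | exact Nat.sub_succ_lt_self _ _ h

def iter_cells_py_alt (text : String) : List (Int × Int × String × Int × Int) :=
  loopB text.toList 0 0 0 .start 0 0 [] []

-- ===== PRECONDITION & SPEC =====
def Spec_iter_cells_py (text : String) (out : List (Int × Int × String × Int × Int)) : Prop := out = iter_cells_py_alt text
instance (text : String) (out : List (Int × Int × String × Int × Int)) : Decidable (Spec_iter_cells_py text out) := by unfold Spec_iter_cells_py; infer_instance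

-- ===== CLAIM (what is proved, stated in full; the proofs are below) =====
def Claim_equal_iter_cells_py : Prop := ∀ (text : String), Dom_iter_cells_py text → Spec_iter_cells_py text (iter_cells_py text)

-- ===== LEMMAS AND PROOFS =====

def cellOf (row col : Nat) (s : String) (a b : Nat) : Int × Int × String × Int × Int :=
  ((row : Int), (col : Int), s, (a : Int), (b : Int))

-- A's post-emit delimiter handling, factored out for the proof
def afterCell (cs : List Char) (p row col : Nat)
    (cells : List (Int × Int × String × Int × Int)) : List (Int × Int × String × Int × Int) :=
  if h2 : p < cs.length then
    if cs[p] = ',' then loopA cs (p + 1) row (col + 1) cells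
    else if cs[p] = '\r' then
      loopA cs (if p + 1 < cs.length ∧ cs[p + 1]? = some '\n' then p + 2 else p + 1)
        (row + 1) 0 cells
    else if cs[p] = '\n' then loopA cs (p + 1) (row + 1) 0 cells
    else loopA cs (p + 1) row col cells
  else cells

theorem scanA_base (cs : List Char) (i : Nat) (h : ¬ i < cs.length) : scanA cs i = i := by
  rw [scanA]; simp [h]

theorem scanA_delim (cs : List Char) (i : Nat) (h : i < cs.length)
    (hd : cs[i] = ',' ∨ cs[i] = '\r' ∨ cs[i] = '\n') : scanA cs i = i := by
  rw [scanA]; simp [h, hd]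

theorem scanA_step (cs : List Char) (i : Nat) (h : i < cs.length)
    (hd : ¬ (cs[i] = ',' ∨ cs[i] = '\r' ∨ cs[i] = '\n')) : scanA cs i = scanA cs (i + 1) := by
  rw [scanA]; simp [h, hd]

theorem scanA_le (cs : List Char) (i : Nat) (h : i ≤ cs.length) : scanA cs i ≤ cs.length := by
  rw [scanA]
  split
  · split
    · omega
    · exact scanA_le cs (i + 1) (by omega)
  · omega
termination_by cs.length - i

theorem quoteA_le (cs : List Char) (i : Nat) (chars : List Char) (h : i ≤ cs.length) :
    (quoteA cs i chars).2.2 ≤ cs.length := by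
  rw [quoteA]
  split
  · split
    · split
      · exact quoteA_le cs (i + 2) _ (by omega)
      · simpa using ‹i < cs.length›
    · exact quoteA_le cs (i + 1) _ (by omega)
  · simpa
termination_by cs.length - i

theorem quoteA_none_ge (cs : List Char) (i : Nat) (chars : List Char)
    (h : (quoteA cs i chars).2.1 = none) : cs.length ≤ (quoteA cs i chars).2.2 := by
  rw [quoteA] at h ⊢
  by_cases hi : i < cs.length
  · simp only [hi, dif_pos] at h ⊢
    by_cases hq : cs[i] = '"'
    · by_cases hdq : i + 1 < cs.length ∧ cs[i + 1]? = some '"'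
      · simp only [hq, hdq, if_pos] at h ⊢
        exact quoteA_none_ge cs (i + 2) _ h
      · simp [hq, hdq] at h
    · simp only [hq, reduceIte] at h ⊢
      exact quoteA_none_ge cs (i + 1) _ h
  · simp only [hi, reduceDIte]
    omega
termination_by cs.length - i

theorem drop_take_self (cs : List Char) (i : Nat) : (cs.take i).drop i = [] :=
  List.drop_eq_nil_of_le (by rw [List.length_take]; omega)

theorem take_drop_cons (cs : List Char) (i j : Nat) (hij : i < j) (hi : i < cs.length) :
    (cs.take j).drop i = cs[i] :: (cs.take j).drop (i + 1) := by
  have hlen : i < (cs.take j).length := by simp [List.length_take]; omega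
  rw [List.drop_eq_getElem_cons hlen]
  simp

-- the .start state on a non-quote character behaves as a fresh .unq state
theorem loopB_start_unq (cs : List Char) (i row col cstart cend : Nat) (buf : List Char)
    (cells : List (Int × Int × String × Int × Int)) (hi : i < cs.length) (hq : ¬ cs[i] = '"') :
    loopB cs i row col .start cstart cend buf cells =
    loopB cs i row col .unq i cend [] cells := by
  rw [loopB, loopB]
  simp [hi, hq]

theorem loopA_base (cs : List Char) (i row col : Nat)
    (cells : List (Int × Int × String × Int × Int)) (h : ¬ i < cs.length) :
    loopA cs i row col cells = cells := by
  rw [loopA]; simp [h]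

theorem loopA_quote (cs : List Char) (i row col : Nat)
    (cells : List (Int × Int × String × Int × Int)) (hi : i < cs.length) (hq : cs[i] = '"') :
    loopA cs i row col cells =
      afterCell cs (scanA cs (quoteA cs (i + 1) []).2.2) row col
        (cells ++ [cellOf row col (String.ofList (quoteA cs (i + 1) []).1) (i + 1)
          ((quoteA cs (i + 1) []).2.1.getD cs.length)]) := by
  rw [loopA, afterCell]
  simp [hi, hq, cellOf]

theorem loopA_unq (cs : List Char) (i row col : Nat)
    (cells : List (Int × Int × String × Int × Int)) (hi : i < cs.length) (hq : ¬ cs[i] = '"') :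
    loopA cs i row col cells =
      afterCell cs (scanA cs i) row col
        (cells ++ [cellOf row col (String.ofList ((cs.take (scanA cs i)).drop i)) i (scanA cs i)]) := by
  rw [loopA, afterCell]
  simp [hi, hq, cellOf]

-- the quoted-field state machine run agrees with A's inner quote loop
theorem loopB_inq (cs : List Char) (i row col cstart cend : Nat) (buf : List Char)
    (cells : List (Int × Int × String × Int × Int)) :
    loopB cs i row col .inq cstart cend buf cells =
      (match quoteA cs i buf with
       | (chars, some ce, i2) => loopB cs i2 row col .afterq cstart ce chars cells
       | (chars, none, _) =>
         cells ++ [cellOf row col (String.ofList chars) cstart cs.length]) := by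
  rw [loopB, quoteA]
  by_cases hi : i < cs.length
  · simp only [hi, dif_pos]
    by_cases hq : cs[i] = '"'
    · by_cases hdq : i + 1 < cs.length ∧ cs[i + 1]? = some '"'
      · simp only [hq, hdq, if_pos]
        exact loopB_inq cs (i + 2) row col cstart cend (buf ++ ['"']) cells
      · simp [hq, hdq]
    · simp only [hq, reduceIte]
      exact loopB_inq cs (i + 1) row col cstart cend (buf ++ [cs[i]]) cells
  · simp [hi, cellOf]
termination_by cs.length - i

-- the combined invariant: afterq-run, unquoted-run and whole-loop agreement at index i
theorem triple (cs : List Char) (k : Nat) : ∀ i, i ≤ cs.length → cs.length - i = k →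
    (∀ row col cstart cend buf (cells : List (Int × Int × String × Int × Int)),
      loopB cs i row col .afterq cstart cend buf cells =
        afterCell cs (scanA cs i) row col
          (cells ++ [cellOf row col (String.ofList buf) cstart cend])) ∧
    (∀ row col cstart cend buf (cells : List (Int × Int × String × Int × Int)),
      loopB cs i row col .unq cstart cend buf cells =
        afterCell cs (scanA cs i) row col
          (cells ++ [cellOf row col (String.ofList (buf ++ (cs.take (scanA cs i)).drop i))
            cstart (scanA cs i)])) ∧
    (∀ row col cstart cend buf (cells : List (Int × Int × String × Int × Int)),
      loopB cs i row col .start cstart cend buf cells = loopA cs i row col cells) := by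
  induction k using Nat.strong_induction_on with
  | _ k IH =>
    intro i hile hk
    have IH' : ∀ j, i < j → j ≤ cs.length →
        (∀ row col cstart cend buf (cells : List (Int × Int × String × Int × Int)),
          loopB cs j row col .afterq cstart cend buf cells =
            afterCell cs (scanA cs j) row col
              (cells ++ [cellOf row col (String.ofList buf) cstart cend])) ∧
        (∀ row col cstart cend buf (cells : List (Int × Int × String × Int × Int)),
          loopB cs j row col .unq cstart cend buf cells =
            afterCell cs (scanA cs j) row col
              (cells ++ [cellOf row col (String.ofList (buf ++ (cs.take (scanA cs j)).drop j))
                cstart (scanA cs j)])) ∧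
        (∀ row col cstart cend buf (cells : List (Int × Int × String × Int × Int)),
          loopB cs j row col .start cstart cend buf cells = loopA cs j row col cells) :=
      fun j hj hjle => IH (cs.length - j) (by omega) j hjle rfl
    have hAQ : ∀ row col cstart cend buf (cells : List (Int × Int × String × Int × Int)),
        loopB cs i row col .afterq cstart cend buf cells =
          afterCell cs (scanA cs i) row col
            (cells ++ [cellOf row col (String.ofList buf) cstart cend]) := by
      intro row col cstart cend buf cells
      by_cases hi : i < cs.length
      · by_cases hc : cs[i] = ','
        · have hM := (IH' (i + 1) (by omega) (by omega)).2.2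
          rw [scanA_delim cs i hi (Or.inl hc), afterCell, loopB]
          simp only [hi, ↓reduceDIte, hc]
          simp only [show (BMode.afterq = BMode.inq) = False by simp,
            show (BMode.afterq = BMode.start) = False by simp,
            ]
          simp only [if_true, if_false, false_and, 
            ]
          rw [hM]
          simp [cellOf]
        · by_cases hr : cs[i] = '\r'
          · rw [scanA_delim cs i hi (Or.inr (Or.inl hr)), afterCell, loopB]
            simp only [hi, ↓reduceDIte, hr]
            simp only [show (BMode.afterq = BMode.inq) = False by simp,
              show (BMode.afterq = BMode.start) = False by simp,
              ]
            simp only [if_true, if_false, and_false, 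
              Char.reduceEq, true_and, or_false]
            by_cases hnl : i + 1 < cs.length ∧ cs[i + 1]? = some '\n'
            · have hM := (IH' (i + 2) (by omega) (by omega)).2.2
              simp only [hnl.1, hnl.2, and_self, if_true]
              rw [hM]
              simp [cellOf]
            · have hM := (IH' (i + 1) (by omega) (by omega)).2.2
              simp only [hnl, if_false]
              rw [hM]
              simp [cellOf]
          · by_cases hn : cs[i] = '\n'
            · have hM := (IH' (i + 1) (by omega) (by omega)).2.2
              rw [scanA_delim cs i hi (Or.inr (Or.inr hn)), afterCell, loopB]
              simp only [hi, ↓reduceDIte, hn]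
              simp only [show (BMode.afterq = BMode.inq) = False by simp,
                show (BMode.afterq = BMode.start) = False by simp,
                ]
              simp only [if_true, if_false, false_and, and_false, 
                Char.reduceEq, or_true]
              rw [hM]
              simp [cellOf]
            · have hA := (IH' (i + 1) (by omega) (by omega)).1
              rw [scanA_step cs i hi (by tauto), loopB]
              simp only [hi, ↓reduceDIte, hc, hr, hn]
              simp only [show (BMode.afterq = BMode.inq) = False by simp,
                show (BMode.afterq = BMode.start) = False by simp,
                ]
              simp only [if_false, false_and, 
                or_self]
              rw [hA]
              simp
      · rw [scanA_base cs i hi, loopB]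
        simp only [hi, ↓reduceDIte]
        rw [afterCell]
        simp [hi, cellOf]
    have hU : ∀ row col cstart cend buf (cells : List (Int × Int × String × Int × Int)),
        loopB cs i row col .unq cstart cend buf cells =
          afterCell cs (scanA cs i) row col
            (cells ++ [cellOf row col (String.ofList (buf ++ (cs.take (scanA cs i)).drop i))
              cstart (scanA cs i)]) := by
      intro row col cstart cend buf cells
      by_cases hi : i < cs.length
      · by_cases hc : cs[i] = ','
        · have hM := (IH' (i + 1) (by omega) (by omega)).2.2
          rw [scanA_delim cs i hi (Or.inl hc), afterCell, loopB]
          simp only [hi, ↓reduceDIte, hc]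
          simp only [show (BMode.unq = BMode.inq) = False by simp,
            show (BMode.unq = BMode.start) = False by simp,
            ]
          simp only [if_true, if_false, false_and, 
            ]
          rw [hM]
          simp [cellOf, drop_take_self cs i]
        · by_cases hr : cs[i] = '\r'
          · rw [scanA_delim cs i hi (Or.inr (Or.inl hr)), afterCell, loopB]
            simp only [hi, ↓reduceDIte, hr]
            simp only [show (BMode.unq = BMode.inq) = False by simp,
              show (BMode.unq = BMode.start) = False by simp,
              ]
            simp only [if_true, if_false, and_false, 
              Char.reduceEq, true_and, or_false]
            by_cases hnl : i + 1 < cs.length ∧ cs[i + 1]? = some '\n'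
            · have hM := (IH' (i + 2) (by omega) (by omega)).2.2
              simp only [hnl.1, hnl.2, and_self, if_true]
              rw [hM]
              simp [cellOf, drop_take_self cs i]
            · have hM := (IH' (i + 1) (by omega) (by omega)).2.2
              simp only [hnl, if_false]
              rw [hM]
              simp [cellOf, drop_take_self cs i]
          · by_cases hn : cs[i] = '\n'
            · have hM := (IH' (i + 1) (by omega) (by omega)).2.2
              rw [scanA_delim cs i hi (Or.inr (Or.inr hn)), afterCell, loopB]
              simp only [hi, ↓reduceDIte, hn]
              simp only [show (BMode.unq = BMode.inq) = False by simp,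
                show (BMode.unq = BMode.start) = False by simp,
                ]
              simp only [if_true, if_false, false_and, and_false, 
                Char.reduceEq, or_true]
              rw [hM]
              simp [cellOf, drop_take_self cs i]
            · have hUs := (IH' (i + 1) (by omega) (by omega)).2.1
              have hstep := scanA_step cs i hi (by tauto)
              have hgt : i < scanA cs (i + 1) :=
                lt_of_lt_of_le (by omega) (scanA_ge cs (i + 1))
              rw [hstep, loopB]
              simp only [hi, ↓reduceDIte, hc, hr, hn]
              simp only [show (BMode.unq = BMode.inq) = False by simp,
                show (BMode.unq = BMode.start) = False by simp,
                ]
              simp only [if_true, if_false, false_and, 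
                or_self]
              rw [hUs]
              rw [take_drop_cons cs i (scanA cs (i + 1)) hgt hi]
              simp [cellOf]
      · have hieq : i = cs.length := by omega
        rw [scanA_base cs i hi, loopB]
        simp only [hi, ↓reduceDIte]
        rw [afterCell]
        simp [cellOf, hieq]
    refine ⟨hAQ, hU, ?_⟩
    intro row col cstart cend buf cells
    by_cases hi : i < cs.length
    · by_cases hq : cs[i] = '"'
      · rw [loopB]
        simp only [hi, ↓reduceDIte, hq]
        simp only [show (BMode.start = BMode.inq) = False by simp,
          ]
        simp only [if_true, if_false, and_true, 
          ]
        rw [loopB_inq]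
        rw [loopA_quote cs i row col cells hi hq]
        rcases hqa : quoteA cs (i + 1) [] with ⟨chars, ceo, i2⟩
        rcases ceo with _ | ce
        · -- unterminated quote
          dsimp only
          have h1 := quoteA_none_ge cs (i + 1) [] (by rw [hqa])
          have h2 := quoteA_le cs (i + 1) [] (by omega)
          rw [hqa] at h1 h2
          simp only at h1 h2
          have : i2 = cs.length := by omega
          subst this
          rw [scanA_base cs cs.length (by omega), afterCell]
          simp [cellOf]
        · -- terminated quote: continue in afterq state
          dsimp only
          have hge := quoteA_ge cs (i + 1) []
          have hle := quoteA_le cs (i + 1) [] (by omega)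
          rw [hqa] at hge hle
          simp only at hge hle
          have hA := (IH' i2 (by omega) hle).1
          rw [hA]
          simp [cellOf]
      · rw [loopB_start_unq cs i row col cstart cend buf cells hi hq]
        rw [hU row col i cend [] cells]
        rw [loopA_unq cs i row col cells hi hq]
        simp
    · rw [loopB]
      simp only [hi, ↓reduceDIte]
      rw [loopA_base cs i row col cells hi]

theorem main_equiv (cs : List Char) (i row col : Nat)
    (cells : List (Int × Int × String × Int × Int)) (hi : i ≤ cs.length) :
    loopB cs i row col .start 0 0 [] cells = loopA cs i row col cells :=
  ((triple cs (cs.length - i) i hi rfl).2.2) row col 0 0 [] cells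

-- ===== VERDICT (by name: the statement is the Claim_ definition above) =====
theorem iter_cells_py_spec : Claim_equal_iter_cells_py := by
  intro text _
  unfold Spec_iter_cells_py iter_cells_py iter_cells_py_alt
  exact (main_equiv text.toList 0 0 0 [] (by omega)).symm
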